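-- pv_equiv track=rewrite | github.com/kinoshitayoshihiro/composer2 | generator/riff_generator.py | _nearest_scale_note
-- ===== SOURCE A (Python) =====
-- from typing import Any, Dict, List, Tuple, Optional
-- from typing import Any, Dict, List, Tuple, Optional
--
-- def _nearest_scale_note(midi: int, pcs: List[int]) -> int:
--     if not pcs:
--         return midi
--     best = midi
--     best_d = 128
--     for off in range(-6, 7):
--         cand = midi + off
--         if (cand % 12) in pcs:
--             d = abs(off)
--             if d < best_d:
--                 best, best_d = cand, d
--     return best
-- ===== SOURCE B (Python) =====
-- def _nearest_scale_note(midi: int, pcs: list) -> int: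
--     if not pcs:
--         return midi
--     if midi % 12 in pcs:
--         return midi
--     for d in range(1, 7):
--         if (midi - d) % 12 in pcs:
--             return midi - d
--         if (midi + d) % 12 in pcs:
--             return midi + d
--     return midi
-- ===== Notes on version B (the rewrite author's own statement) =====
-- stated objective: alternative
-- what changed: Replaced the full scan over offsets -6..6 that tracks a (best, best_d) pair with an expanding ring search that returns at the first match, checking midi, then midi-d before midi+d for d=1..6.
import Mathlib
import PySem

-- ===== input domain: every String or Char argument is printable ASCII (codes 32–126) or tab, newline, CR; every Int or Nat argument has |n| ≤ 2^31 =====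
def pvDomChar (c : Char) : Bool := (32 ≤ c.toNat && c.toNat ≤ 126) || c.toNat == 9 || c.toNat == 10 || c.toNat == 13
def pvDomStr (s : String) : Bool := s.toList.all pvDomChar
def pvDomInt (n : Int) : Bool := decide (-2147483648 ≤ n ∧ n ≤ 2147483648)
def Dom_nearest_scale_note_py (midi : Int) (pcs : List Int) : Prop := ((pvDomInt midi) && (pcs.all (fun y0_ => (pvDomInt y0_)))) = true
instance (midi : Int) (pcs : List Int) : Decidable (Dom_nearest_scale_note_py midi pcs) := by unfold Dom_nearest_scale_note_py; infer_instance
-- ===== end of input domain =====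

-- B replaces A's full 13-offset best-tracking scan with an early-exit expanding ring search (lower note first on ties); same results, no speed claim.

-- ===== PORT A =====
-- one step of A's loop body: state is (best, best_d)
def nsnStep (midi : Int) (pcs : List Int) (s : Int × Int) (off : Int) : Int × Int :=
  let cand := midi + off
  if PySem.Int.mod cand 12 ∈ pcs then
    let d := |off|
    if d < s.2 then (cand, d) else s
  else s

def nearest_scale_note_py (midi : Int) (pcs : List Int) : Int :=
  if pcs = [] then midi
  else ((PySem.List.pyRange (-6) 7 1).foldl (nsnStep midi pcs) (midi, 128)).1

-- ===== PORT B =====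
-- B's `for d in range(1, 7)` loop with its two early returns
def nsnAltLoop (midi : Int) (pcs : List Int) : List Int → Int
  | [] => midi
  | d :: rest =>
    if PySem.Int.mod (midi - d) 12 ∈ pcs then midi - d
    else if PySem.Int.mod (midi + d) 12 ∈ pcs then midi + d
    else nsnAltLoop midi pcs rest

def nearest_scale_note_py_alt (midi : Int) (pcs : List Int) : Int :=
  if pcs = [] then midi
  else if PySem.Int.mod midi 12 ∈ pcs then midi
  else nsnAltLoop midi pcs (PySem.List.pyRange 1 7 1)

-- ===== PRECONDITION & SPEC =====
def Spec_nearest_scale_note_py (midi : Int) (pcs : List Int) (out : Int) : Prop := out = nearest_scale_note_py_alt midi pcs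
instance (midi : Int) (pcs : List Int) (out : Int) : Decidable (Spec_nearest_scale_note_py midi pcs out) := by unfold Spec_nearest_scale_note_py; infer_instance

-- ===== CLAIM (what is proved, stated in full; the proofs are below) =====
def Claim_equal_nearest_scale_note_py : Prop := ∀ (midi : Int) (pcs : List Int), Dom_nearest_scale_note_py midi pcs → Spec_nearest_scale_note_py midi pcs (nearest_scale_note_py midi pcs)

-- ===== LEMMAS AND PROOFS =====

theorem nsn_mod12 (a : Int) : PySem.Int.mod a 12 = a % 12 :=
  PySem.Int.mod_eq_emod_of_pos (by norm_num)

-- the fold does nothing on a segment where every offset is either not in pcs or not closer than the current best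
theorem nsn_fold_noop (midi : Int) (pcs : List Int) (l : List Int) (s : Int × Int)
    (h : ∀ off ∈ l, (midi + off) % 12 ∉ pcs ∨ s.2 ≤ |off|) :
    l.foldl (nsnStep midi pcs) s = s := by
  induction l with
  | nil => rfl
  | cons a t ih =>
    have ha := h a (by simp)
    have hstep : nsnStep midi pcs s a = s := by
      simp only [nsnStep, nsn_mod12]
      rcases ha with h1 | h1
      · simp [h1]
      · split_ifs <;> first | rfl | omega
    rw [List.foldl_cons, hstep]
    exact ih (fun off hoff => h off (by simp [hoff]))

-- the fold keeps best_d above |k| on a segment where every offset is either not in pcs or strictly farther than |k|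
theorem nsn_fold_lb (midi : Int) (pcs : List Int) (l : List Int) (k : Int) :
    ∀ s : Int × Int, |k| < s.2 →
    (∀ off ∈ l, (midi + off) % 12 ∉ pcs ∨ |k| < |off|) →
    |k| < (l.foldl (nsnStep midi pcs) s).2 := by
  induction l with
  | nil => intro s hs _; simpa using hs
  | cons a t ih =>
    intro s hs h
    have ha := h a (by simp)
    rw [List.foldl_cons]
    refine ih (nsnStep midi pcs s a) ?_ (fun off hoff => h off (by simp [hoff]))
    simp only [nsnStep, nsn_mod12]
    rcases ha with h1 | h1
    · simpa [h1] using hs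
    · split_ifs <;> first | exact hs | simpa using h1

-- A's fold returns (midi + k, |k|) when the scan list splits as pre ++ k :: suf with k the first closest hit
theorem nsn_fold_main (midi : Int) (pcs : List Int) (pre suf : List Int) (k : Int)
    (hk128 : |k| < 128)
    (hpre : ∀ off ∈ pre, (midi + off) % 12 ∉ pcs ∨ |k| < |off|)
    (hk : (midi + k) % 12 ∈ pcs)
    (hsuf : ∀ off ∈ suf, (midi + off) % 12 ∉ pcs ∨ |k| ≤ |off|) :
    (pre ++ k :: suf).foldl (nsnStep midi pcs) (midi, 128) = (midi + k, |k|) := by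
  rw [List.foldl_append]
  have hlb := nsn_fold_lb midi pcs pre k (midi, 128) (by simpa using hk128) hpre
  set s := pre.foldl (nsnStep midi pcs) (midi, 128) with hs
  rw [List.foldl_cons]
  have hstep : nsnStep midi pcs s k = (midi + k, |k|) := by
    simp only [nsnStep, nsn_mod12]
    rw [if_pos hk, if_pos hlb]
  rw [hstep]
  exact nsn_fold_noop midi pcs suf (midi + k, |k|) (by simpa using hsuf)

-- ===== VERDICT (by name: the statement is the Claim_ definition above) =====
theorem nearest_scale_note_py_spec : Claim_equal_nearest_scale_note_py := by
  intro midi pcs _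
  unfold Spec_nearest_scale_note_py nearest_scale_note_py nearest_scale_note_py_alt
  by_cases hE : pcs = []
  · simp [hE]
  simp only [hE, if_false]
  have hrange : PySem.List.pyRange (-6) 7 1 = [-6, -5, -4, -3, -2, -1, 0, 1, 2, 3, 4, 5, 6] := by decide
  have hrange1 : PySem.List.pyRange 1 7 1 = [1, 2, 3, 4, 5, 6] := by decide
  rw [hrange, hrange1]
  simp only [nsnAltLoop, nsn_mod12]
  have e0 : midi + (0 : Int) = midi := by ring
  have em : ∀ d : Int, midi + -d = midi - d := fun d => by ring
  by_cases h0 : midi % 12 ∈ pcs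
  · rw [if_pos h0,
      show ([-6, -5, -4, -3, -2, -1, 0, 1, 2, 3, 4, 5, 6] : List Int)
        = [-6, -5, -4, -3, -2, -1] ++ (0 : Int) :: [1, 2, 3, 4, 5, 6] from rfl,
      nsn_fold_main midi pcs _ _ (0) (by norm_num)
        (by intro off hoff; fin_cases hoff <;> first | (right; decide) | (left; assumption) | (left; rw [e0]; assumption) | (left; rw [em]; assumption))
        (by rw [e0]; exact h0)
        (by intro off hoff; fin_cases hoff <;> first | (right; decide) | (left; assumption) | (left; rw [e0]; assumption) | (left; rw [em]; assumption))]
    try ring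
  rw [if_neg h0]
  by_cases h1m : (midi - 1) % 12 ∈ pcs
  · rw [if_pos h1m,
      show ([-6, -5, -4, -3, -2, -1, 0, 1, 2, 3, 4, 5, 6] : List Int)
        = [-6, -5, -4, -3, -2] ++ (-1 : Int) :: [0, 1, 2, 3, 4, 5, 6] from rfl,
      nsn_fold_main midi pcs _ _ (-1) (by norm_num)
        (by intro off hoff; fin_cases hoff <;> first | (right; decide) | (left; assumption) | (left; rw [e0]; assumption) | (left; rw [em]; assumption))
        (by rw [em]; exact h1m)
        (by intro off hoff; fin_cases hoff <;> first | (right; decide) | (left; assumption) | (left; rw [e0]; assumption) | (left; rw [em]; assumption))]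
    try ring
  rw [if_neg h1m]
  by_cases h1p : (midi + 1) % 12 ∈ pcs
  · rw [if_pos h1p,
      show ([-6, -5, -4, -3, -2, -1, 0, 1, 2, 3, 4, 5, 6] : List Int)
        = [-6, -5, -4, -3, -2, -1, 0] ++ (1 : Int) :: [2, 3, 4, 5, 6] from rfl,
      nsn_fold_main midi pcs _ _ (1) (by norm_num)
        (by intro off hoff; fin_cases hoff <;> first | (right; decide) | (left; assumption) | (left; rw [e0]; assumption) | (left; rw [em]; assumption))
        h1p
        (by intro off hoff; fin_cases hoff <;> first | (right; decide) | (left; assumption) | (left; rw [e0]; assumption) | (left; rw [em]; assumption))]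
    try ring
  rw [if_neg h1p]
  by_cases h2m : (midi - 2) % 12 ∈ pcs
  · rw [if_pos h2m,
      show ([-6, -5, -4, -3, -2, -1, 0, 1, 2, 3, 4, 5, 6] : List Int)
        = [-6, -5, -4, -3] ++ (-2 : Int) :: [-1, 0, 1, 2, 3, 4, 5, 6] from rfl,
      nsn_fold_main midi pcs _ _ (-2) (by norm_num)
        (by intro off hoff; fin_cases hoff <;> first | (right; decide) | (left; assumption) | (left; rw [e0]; assumption) | (left; rw [em]; assumption))
        (by rw [em]; exact h2m)
        (by intro off hoff; fin_cases hoff <;> first | (right; decide) | (left; assumption) | (left; rw [e0]; assumption) | (left; rw [em]; assumption))]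
    try ring
  rw [if_neg h2m]
  by_cases h2p : (midi + 2) % 12 ∈ pcs
  · rw [if_pos h2p,
      show ([-6, -5, -4, -3, -2, -1, 0, 1, 2, 3, 4, 5, 6] : List Int)
        = [-6, -5, -4, -3, -2, -1, 0, 1] ++ (2 : Int) :: [3, 4, 5, 6] from rfl,
      nsn_fold_main midi pcs _ _ (2) (by norm_num)
        (by intro off hoff; fin_cases hoff <;> first | (right; decide) | (left; assumption) | (left; rw [e0]; assumption) | (left; rw [em]; assumption))
        h2p
        (by intro off hoff; fin_cases hoff <;> first | (right; decide) | (left; assumption) | (left; rw [e0]; assumption) | (left; rw [em]; assumption))]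
    try ring
  rw [if_neg h2p]
  by_cases h3m : (midi - 3) % 12 ∈ pcs
  · rw [if_pos h3m,
      show ([-6, -5, -4, -3, -2, -1, 0, 1, 2, 3, 4, 5, 6] : List Int)
        = [-6, -5, -4] ++ (-3 : Int) :: [-2, -1, 0, 1, 2, 3, 4, 5, 6] from rfl,
      nsn_fold_main midi pcs _ _ (-3) (by norm_num)
        (by intro off hoff; fin_cases hoff <;> first | (right; decide) | (left; assumption) | (left; rw [e0]; assumption) | (left; rw [em]; assumption))
        (by rw [em]; exact h3m)
        (by intro off hoff; fin_cases hoff <;> first | (right; decide) | (left; assumption) | (left; rw [e0]; assumption) | (left; rw [em]; assumption))]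
    try ring
  rw [if_neg h3m]
  by_cases h3p : (midi + 3) % 12 ∈ pcs
  · rw [if_pos h3p,
      show ([-6, -5, -4, -3, -2, -1, 0, 1, 2, 3, 4, 5, 6] : List Int)
        = [-6, -5, -4, -3, -2, -1, 0, 1, 2] ++ (3 : Int) :: [4, 5, 6] from rfl,
      nsn_fold_main midi pcs _ _ (3) (by norm_num)
        (by intro off hoff; fin_cases hoff <;> first | (right; decide) | (left; assumption) | (left; rw [e0]; assumption) | (left; rw [em]; assumption))
        h3p
        (by intro off hoff; fin_cases hoff <;> first | (right; decide) | (left; assumption) | (left; rw [e0]; assumption) | (left; rw [em]; assumption))]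
    try ring
  rw [if_neg h3p]
  by_cases h4m : (midi - 4) % 12 ∈ pcs
  · rw [if_pos h4m,
      show ([-6, -5, -4, -3, -2, -1, 0, 1, 2, 3, 4, 5, 6] : List Int)
        = [-6, -5] ++ (-4 : Int) :: [-3, -2, -1, 0, 1, 2, 3, 4, 5, 6] from rfl,
      nsn_fold_main midi pcs _ _ (-4) (by norm_num)
        (by intro off hoff; fin_cases hoff <;> first | (right; decide) | (left; assumption) | (left; rw [e0]; assumption) | (left; rw [em]; assumption))
        (by rw [em]; exact h4m)
        (by intro off hoff; fin_cases hoff <;> first | (right; decide) | (left; assumption) | (left; rw [e0]; assumption) | (left; rw [em]; assumption))]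
    try ring
  rw [if_neg h4m]
  by_cases h4p : (midi + 4) % 12 ∈ pcs
  · rw [if_pos h4p,
      show ([-6, -5, -4, -3, -2, -1, 0, 1, 2, 3, 4, 5, 6] : List Int)
        = [-6, -5, -4, -3, -2, -1, 0, 1, 2, 3] ++ (4 : Int) :: [5, 6] from rfl,
      nsn_fold_main midi pcs _ _ (4) (by norm_num)
        (by intro off hoff; fin_cases hoff <;> first | (right; decide) | (left; assumption) | (left; rw [e0]; assumption) | (left; rw [em]; assumption))
        h4p
        (by intro off hoff; fin_cases hoff <;> first | (right; decide) | (left; assumption) | (left; rw [e0]; assumption) | (left; rw [em]; assumption))]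
    try ring
  rw [if_neg h4p]
  by_cases h5m : (midi - 5) % 12 ∈ pcs
  · rw [if_pos h5m,
      show ([-6, -5, -4, -3, -2, -1, 0, 1, 2, 3, 4, 5, 6] : List Int)
        = [-6] ++ (-5 : Int) :: [-4, -3, -2, -1, 0, 1, 2, 3, 4, 5, 6] from rfl,
      nsn_fold_main midi pcs _ _ (-5) (by norm_num)
        (by intro off hoff; fin_cases hoff <;> first | (right; decide) | (left; assumption) | (left; rw [e0]; assumption) | (left; rw [em]; assumption))
        (by rw [em]; exact h5m)
        (by intro off hoff; fin_cases hoff <;> first | (right; decide) | (left; assumption) | (left; rw [e0]; assumption) | (left; rw [em]; assumption))]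
    try ring
  rw [if_neg h5m]
  by_cases h5p : (midi + 5) % 12 ∈ pcs
  · rw [if_pos h5p,
      show ([-6, -5, -4, -3, -2, -1, 0, 1, 2, 3, 4, 5, 6] : List Int)
        = [-6, -5, -4, -3, -2, -1, 0, 1, 2, 3, 4] ++ (5 : Int) :: [6] from rfl,
      nsn_fold_main midi pcs _ _ (5) (by norm_num)
        (by intro off hoff; fin_cases hoff <;> first | (right; decide) | (left; assumption) | (left; rw [e0]; assumption) | (left; rw [em]; assumption))
        h5p
        (by intro off hoff; fin_cases hoff <;> first | (right; decide) | (left; assumption) | (left; rw [e0]; assumption) | (left; rw [em]; assumption))]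
    try ring
  rw [if_neg h5p]
  by_cases h6m : (midi - 6) % 12 ∈ pcs
  · rw [if_pos h6m,
      show ([-6, -5, -4, -3, -2, -1, 0, 1, 2, 3, 4, 5, 6] : List Int)
        = [] ++ (-6 : Int) :: [-5, -4, -3, -2, -1, 0, 1, 2, 3, 4, 5, 6] from rfl,
      nsn_fold_main midi pcs _ _ (-6) (by norm_num)
        (by intro off hoff; fin_cases hoff <;> first | (right; decide) | (left; assumption) | (left; rw [e0]; assumption) | (left; rw [em]; assumption))
        (by rw [em]; exact h6m)
        (by intro off hoff; fin_cases hoff <;> first | (right; decide) | (left; assumption) | (left; rw [e0]; assumption) | (left; rw [em]; assumption))]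
    try ring
  rw [if_neg h6m]
  by_cases h6p : (midi + 6) % 12 ∈ pcs
  · rw [if_pos h6p,
      show ([-6, -5, -4, -3, -2, -1, 0, 1, 2, 3, 4, 5, 6] : List Int)
        = [-6, -5, -4, -3, -2, -1, 0, 1, 2, 3, 4, 5] ++ (6 : Int) :: [] from rfl,
      nsn_fold_main midi pcs _ _ (6) (by norm_num)
        (by intro off hoff; fin_cases hoff <;> first | (right; decide) | (left; assumption) | (left; rw [e0]; assumption) | (left; rw [em]; assumption))
        h6p
        (by intro off hoff; fin_cases hoff <;> first | (right; decide) | (left; assumption) | (left; rw [e0]; assumption) | (left; rw [em]; assumption))]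
    try ring
  rw [if_neg h6p]
  rw [nsn_fold_noop midi pcs _ _ (by intro off hoff; fin_cases hoff <;> first | (right; decide) | (left; assumption) | (left; rw [e0]; assumption) | (left; rw [em]; assumption))]
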